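-- pv_equiv track=rewrite | github.com/BangSungjoon/Algorithm_Study | chw/week54/PGM/258711/sol2.py | solution
-- ===== SOURCE A (Python) =====
-- def solution(edges):
--     max_node = 0
--     for u, v in edges:
--         max_node = max(max_node, u, v)
--
--     nodes = [[] for _ in range(max_node + 1)]
--     out_degree = [0] * (max_node + 1)
--     in_degree = [0] * (max_node + 1)
--
--     for u, v in edges:
--         out_degree[u] += 1
--         in_degree[v] += 1
--         nodes[u].append(v)
--
--     # 생성 정점 찾기
--     created_node = 0
--     for i in range(1, max_node + 1):
--         # 진출 2 이상, 진입 0인 노드가 생성된 정점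
--         if out_degree[i] >= 2 and in_degree[i] == 0:
--             created_node = i
--             break
--
--     # 각 그래프가 몇 개 있는지 판별
--     graphs = [0] * 3  # 도넛, 막대, 8자
--
--     for start in nodes[created_node]:
--         current = start
--
--         turn = 0
--
--         while True:
--             turn += 1
--
--             # 막대 그래프는 나가는 간선이 없는 노드가 존재
--             # 8자 그래프는 중앙점이 나가는 간선이 2개
--             if len(nodes[current]) == 0:
--                 graphs[1] += 1
--                 break
--             elif len(nodes[current]) >= 2:
--                 graphs[2] += 1
--                 break
--
--             # 만약 시작점으로 돌아왔으면 도넛 그래프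
--             if current == start and turn > 1:
--                 graphs[0] += 1
--                 break
--
--             current = nodes[current][0]
--
--     answer = [created_node] + graphs
--     return answer
-- ===== SOURCE B (Python) =====
-- def solution(edges):
--     max_node = 0
--     for u, v in edges:
--         max_node = max(max_node, u, v)
--     n = max_node + 1
--
--     out_degree = [0] * n
--     in_degree = [0] * n
--     nxt = [0] * n
--     for u, v in edges:
--         out_degree[u] += 1
--         in_degree[v] += 1
--         nxt[u] = v
--
--     created = 0
--     for i in range(1, n):
--         if out_degree[i] >= 2 and in_degree[i] == 0:
--             created = i
--             break
--
--     # global label propagation instead of per-start chain walks: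
--     # cls[x] = 1 if the chain from x ends at an out-degree-0 node (stick),
--     #          2 if it ends at an out-degree>=2 node (figure-8),
--     #          0 if it never leaves out-degree-1 nodes (a pure cycle -> donut)
--     cls = [0] * n
--     for x in range(n):
--         if out_degree[x] == 0:
--             cls[x] = 1
--         elif out_degree[x] >= 2:
--             cls[x] = 2
--     for _ in range(n + 1):
--         for x in range(n):
--             if cls[x] == 0 and out_degree[x] == 1:
--                 cls[x] = cls[nxt[x]]
--
--     graphs = [0, 0, 0]
--     for u, v in edges:
--         if u == created:
--             graphs[cls[v]] += 1
--     return [created] + graphs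
-- ===== Notes on version B (the rewrite author's own statement) =====
-- stated objective: alternative
-- what changed: B replaces A's per-start while-True chain walks (and the adjacency lists they need) with a global fixed-point label propagation: one scalar next-successor array, an initial labelling of non-out-degree-1 nodes as stick/figure-8 ends, n+1 relaxation rounds that copy each out-degree-1 node's label from its successor, and a final count of the labels of the created node's direct successors (label 0 = unresolved = donut cycle).
-- outside the precondition, e.g. on solution([[1, -3], [1, 2], [-2, 0], [2, 0]]): A returns [1, 0, 3, 0], B returns [1, 0, 2, 0]
import Mathlib
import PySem

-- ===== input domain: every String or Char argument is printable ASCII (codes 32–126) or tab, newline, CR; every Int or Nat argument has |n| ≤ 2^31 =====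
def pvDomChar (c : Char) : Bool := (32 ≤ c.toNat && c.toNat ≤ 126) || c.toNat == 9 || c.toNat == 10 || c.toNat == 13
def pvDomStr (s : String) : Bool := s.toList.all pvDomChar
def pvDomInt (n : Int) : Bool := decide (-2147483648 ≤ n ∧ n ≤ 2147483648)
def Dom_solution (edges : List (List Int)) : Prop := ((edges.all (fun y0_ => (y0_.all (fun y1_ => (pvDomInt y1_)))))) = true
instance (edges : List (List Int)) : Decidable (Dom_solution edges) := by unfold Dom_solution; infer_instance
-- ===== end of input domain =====

-- B replaces A's per-start while-True chain walks (and the adjacency lists they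
-- need) with a global fixed-point label propagation over a scalar next-successor
-- array (objective: alternative; equal return values on Pre_).

-- shared accessors: the 'u, v = e' destructuring of one edge
-- (exact for length-2 edges; Pre_ restricts to those — Python raises ValueError otherwise)
def pvU (e : List Int) : Int := e.getD 0 0
def pvV (e : List Int) : Int := e.getD 1 0

-- the 'max_node = 0; for u, v in edges: max_node = max(max_node, u, v)' loop,
-- textually identical in A and in B (and reused by Pre_'s range bound)
def pvMax (edges : List (List Int)) : Int :=
  edges.foldl (fun m e => max (max m (pvU e)) (pvV e)) 0

-- ===== PORT A =====

-- the single 'for u, v in edges' build loop over (nodes, out_degree, in_degree);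
-- index updates via PySem.List.pySetD/pyGetD (Python-exact, incl. negative indices)
def pvBuildA (edges : List (List Int)) : List (List Int) × List Int × List Int :=
  edges.foldl (fun st e =>
      (PySem.List.pySetD st.1 (pvU e) (PySem.List.pyGetD st.1 (pvU e) [] ++ [pvV e]),
       PySem.List.pySetD st.2.1 (pvU e) (PySem.List.pyGetD st.2.1 (pvU e) 0 + 1),
       PySem.List.pySetD st.2.2 (pvV e) (PySem.List.pyGetD st.2.2 (pvV e) 0 + 1)))
    (List.replicate (pvMax edges + 1).toNat [],
     List.replicate (pvMax edges + 1).toNat 0,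
     List.replicate (pvMax edges + 1).toNat 0)

-- 'for i in range(1, max_node + 1): if out_degree[i] >= 2 and in_degree[i] == 0: created_node = i; break'
def pvCreatedA (edges : List (List Int)) : Int :=
  ((PySem.List.pyRange 1 (pvMax edges + 1) 1).find? (fun i =>
      decide (2 ≤ PySem.List.pyGetD (pvBuildA edges).2.1 i 0) &&
      decide (PySem.List.pyGetD (pvBuildA edges).2.2 i 0 = 0))).getD 0

-- the 'while True' walk; state = (current, turn); returns the graphs-index to bump
-- (fuel is an artifact of totality: inside Pre_ the Python loop stops within the given fuel)
def walkA (nodes : List (List Int)) (start : Int) : Nat → Int → Int → Option Int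
  | 0, _, _ => none
  | fuel+1, current, turn =>
    if (PySem.List.pyGetD nodes current []).length = 0 then some 1
    else if 2 ≤ (PySem.List.pyGetD nodes current []).length then some 2
    else if current = start ∧ turn + 1 > 1 then some 0
    else walkA nodes start fuel
           (PySem.List.pyGetD (PySem.List.pyGetD nodes current []) 0 0) (turn + 1)

def solution (edges : List (List Int)) : List Int :=
  let st := pvBuildA edges
  let created_node := pvCreatedA edges
  let graphs : List Int :=
    (PySem.List.pyGetD st.1 created_node []).foldl (fun graphs start =>
        match walkA st.1 start ((pvMax edges + 1).toNat + 2) start 0 with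
        | some g => PySem.List.pySetD graphs g (PySem.List.pyGetD graphs g 0 + 1)
        | none => graphs)
      [0, 0, 0]
  created_node :: graphs

-- ===== PORT B =====

-- the 'for u, v in edges' build loop over (out_degree, in_degree, nxt);
-- nxt[u] keeps the LAST successor written — for out-degree-1 nodes it is THE successor
def pvBuildB (edges : List (List Int)) : List Int × List Int × List Int :=
  edges.foldl (fun st e =>
      (PySem.List.pySetD st.1 (pvU e) (PySem.List.pyGetD st.1 (pvU e) 0 + 1),
       PySem.List.pySetD st.2.1 (pvV e) (PySem.List.pyGetD st.2.1 (pvV e) 0 + 1),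
       PySem.List.pySetD st.2.2 (pvU e) (pvV e)))
    (List.replicate (pvMax edges + 1).toNat 0,
     List.replicate (pvMax edges + 1).toNat 0,
     List.replicate (pvMax edges + 1).toNat 0)

-- 'created = 0; for i in range(1, n): if out_degree[i] >= 2 and in_degree[i] == 0: created = i; break'
def pvCreatedB (edges : List (List Int)) : Int :=
  ((PySem.List.pyRange 1 (pvMax edges + 1) 1).find? (fun i =>
      decide (2 ≤ PySem.List.pyGetD (pvBuildB edges).1 i 0) &&
      decide (PySem.List.pyGetD (pvBuildB edges).2.1 i 0 = 0))).getD 0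

-- 'cls = [0]*n; for x in range(n): if out_degree[x]==0: cls[x]=1 elif out_degree[x]>=2: cls[x]=2'
def pvClsInit (edges : List (List Int)) : List Int :=
  (PySem.List.pyRange 0 (pvMax edges + 1) 1).foldl (fun cls x =>
      if PySem.List.pyGetD (pvBuildB edges).1 x 0 = 0 then PySem.List.pySetD cls x 1
      else if 2 ≤ PySem.List.pyGetD (pvBuildB edges).1 x 0 then PySem.List.pySetD cls x 2
      else cls)
    (List.replicate (pvMax edges + 1).toNat 0)

-- one relaxation round: 'for x in range(n): if cls[x]==0 and out_degree[x]==1: cls[x]=cls[nxt[x]]'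
def pvPass (edges : List (List Int)) (cls : List Int) : List Int :=
  (PySem.List.pyRange 0 (pvMax edges + 1) 1).foldl (fun cls x =>
      if PySem.List.pyGetD cls x 0 = 0 ∧ PySem.List.pyGetD (pvBuildB edges).1 x 0 = 1 then
        PySem.List.pySetD cls x
          (PySem.List.pyGetD cls (PySem.List.pyGetD (pvBuildB edges).2.2 x 0) 0)
      else cls)
    cls

-- 'for _ in range(n + 1): <one round>'
def pvClsFinal (edges : List (List Int)) : List Int :=
  (PySem.List.pyRange 0 (pvMax edges + 2) 1).foldl (fun cls _ => pvPass edges cls)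
    (pvClsInit edges)

-- 'graphs = [0,0,0]; for u, v in edges: if u == created: graphs[cls[v]] += 1; return [created] + graphs'
def solution_alt (edges : List (List Int)) : List Int :=
  let created := pvCreatedB edges
  let cls := pvClsFinal edges
  created ::
    edges.foldl (fun graphs e =>
        if pvU e = created then
          PySem.List.pySetD graphs (PySem.List.pyGetD cls (pvV e) 0)
            (PySem.List.pyGetD graphs (PySem.List.pyGetD cls (pvV e) 0) 0 + 1)
        else graphs)
      [0, 0, 0]

-- ===== PRECONDITION & SPEC =====
-- spec-level graph notions (independent of both ports)
def pvOut (edges : List (List Int)) (x : Int) : Int :=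
  ((edges.filter (fun e => pvU e == x)).length : Int)
def pvIn (edges : List (List Int)) (x : Int) : Int :=
  ((edges.filter (fun e => pvV e == x)).length : Int)
def pvSucc (edges : List (List Int)) (x : Int) : List Int :=
  (edges.filter (fun e => pvU e == x)).map pvV
def pvNext (edges : List (List Int)) (x : Int) : Int := (pvSucc edges x).getD 0 0
def pvIter (edges : List (List Int)) : Nat → Int → Int
  | 0, s => s
  | k+1, s => pvNext edges (pvIter edges k s)
def pvCreated (edges : List (List Int)) : Int :=
  ((PySem.List.pyRange 1 (pvMax edges + 1) 1).find? (fun i =>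
      decide (2 ≤ pvOut edges i) && decide (pvIn edges i = 0))).getD 0

-- Pre_ restricts to the problem's natural domain — every edge a pair [u,v] of
-- nonnegative vertex labels (A raises ValueError on non-pairs and silently indexes
-- from the end on negative labels, which are outside the donut problem's input
-- space) — and to the inputs on which A's while-loop terminates: every chain out
-- of the created node reaches a terminal or branching node, or returns to its own
-- start, without repeating any other node.
def Pre_solution (edges : List (List Int)) : Prop :=
  (∀ e ∈ edges, e.length = 2 ∧ 0 ≤ pvU e ∧ 0 ≤ pvV e) ∧
  ∀ s ∈ pvSucc edges (pvCreated edges),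
    ∃ k ∈ List.range ((pvMax edges).toNat + 2),
      (∀ j ∈ List.range k, pvOut edges (pvIter edges j s) = 1) ∧
      ((pvOut edges (pvIter edges k s) ≠ 1 ∧
          ((List.range (k+1)).map (fun j => pvIter edges j s)).Nodup) ∨
       (0 < k ∧ pvIter edges k s = s ∧
          ((List.range k).map (fun j => pvIter edges j s)).Nodup))

instance (edges : List (List Int)) : Decidable (Pre_solution edges) := by
  unfold Pre_solution; infer_instance

def pvWitness_solution : List (List Int) := [[1, 2], [1, 3]]

def Spec_solution (edges : List (List Int)) (out : List Int) : Prop := out = solution_alt edges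
instance (edges : List (List Int)) (out : List Int) : Decidable (Spec_solution edges out) := by
  unfold Spec_solution; infer_instance

-- ===== CLAIM (what is proved, stated in full; the proofs are below) =====
def Claim_equal_solution : Prop :=
  ∀ (edges : List (List Int)), Dom_solution edges → Pre_solution edges →
    Spec_solution edges (solution edges)

-- ===== LEMMAS AND PROOFS =====

theorem pv_find?_congr {α : Type} (l : List α) (p q : α → Bool)
    (h : ∀ x ∈ l, p x = q x) : l.find? p = l.find? q := by
  induction l with
  | nil => rfl
  | cons a t ih =>
    simp only [List.find?_cons]
    rw [h a (by simp)]
    cases q a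
    · exact ih (fun x hx => h x (by simp [hx]))
    · rfl

-- the max-fold is monotone and dominates every entry it sees
theorem pv_foldl_max_ge (l : List (List Int)) (a : Int) :
    a ≤ l.foldl (fun m e => max (max m (pvU e)) (pvV e)) a ∧
    ∀ e ∈ l, pvU e ≤ l.foldl (fun m e => max (max m (pvU e)) (pvV e)) a ∧
             pvV e ≤ l.foldl (fun m e => max (max m (pvU e)) (pvV e)) a := by
  induction l generalizing a with
  | nil => simp
  | cons x t ih =>
    refine ⟨le_trans (by simp) (ih (max (max a (pvU x)) (pvV x))).1, ?_⟩
    intro e he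
    rcases List.mem_cons.mp he with rfl | he
    · constructor
      · exact le_trans (by simp) (ih (max (max a (pvU e)) (pvV e))).1
      · exact le_trans (by simp) (ih (max (max a (pvU e)) (pvV e))).1
    · exact (ih (max (max a (pvU x)) (pvV x))).2 e he

theorem pvMax_nonneg (edges : List (List Int)) : 0 ≤ pvMax edges :=
  (pv_foldl_max_ge edges 0).1

theorem mem_le_pvMax {edges : List (List Int)} {e : List Int} (he : e ∈ edges) :
    pvU e ≤ pvMax edges ∧ pvV e ≤ pvMax edges :=
  (pv_foldl_max_ge edges 0).2 e he

-- pyGetD after pySetD at nonnegative in-range Int indices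
theorem pv_pyGetD_pySetD {α : Type} (arr : List α) (i x : Int) (v d : α)
    (hi0 : 0 ≤ i) (hi : i < (arr.length : Int)) (hx0 : 0 ≤ x) (hx : x < (arr.length : Int)) :
    PySem.List.pyGetD (PySem.List.pySetD arr i v) x d =
      if x = i then v else PySem.List.pyGetD arr x d := by
  rw [PySem.List.pySetD_of_nonneg arr v hi0,
      PySem.List.pyGetD_eq_getElem _ d hx0 (by simpa using hx),
      List.getElem_set, PySem.List.pyGetD_eq_getElem _ d hx0 hx]
  by_cases h : x = i <;> simp [h] <;> omega

-- the 'arr[key(e)] += 1' loop counts matching edges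
theorem pv_foldl_incr_getD (l : List (List Int)) (key : List Int → Int) (arr : List Int)
    (x : Int) (hb : ∀ e ∈ l, 0 ≤ key e ∧ key e < (arr.length : Int))
    (hx0 : 0 ≤ x) (hx : x < (arr.length : Int)) :
    PySem.List.pyGetD
        (l.foldl (fun a e => PySem.List.pySetD a (key e) (PySem.List.pyGetD a (key e) 0 + 1)) arr)
        x 0
      = PySem.List.pyGetD arr x 0 + ((l.filter (fun e => key e == x)).length : Int) := by
  induction l generalizing arr with
  | nil => simp
  | cons e t ih =>
    have hbe := hb e (by simp)
    have hlen : ((PySem.List.pySetD arr (key e) (PySem.List.pyGetD arr (key e) 0 + 1)).length : Int)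
        = (arr.length : Int) := by rw [PySem.List.length_pySetD]
    simp only [List.foldl_cons]
    rw [ih _ (fun e' he' => by rw [hlen]; exact hb e' (by simp [he'])) (by rw [hlen]; exact hx),
        pv_pyGetD_pySetD arr (key e) x _ 0 hbe.1 hbe.2 hx0 hx]
    by_cases h : (key e == x) = true
    · have hk : key e = x := by simpa using h
      rw [if_pos hk.symm, List.filter_cons_of_pos (by simpa using h), hk]
      simp only [List.length_cons]
      push_cast
      ring
    · have hk : ¬ (x = key e) := fun hh => h (by simp [hh])
      rw [if_neg hk, List.filter_cons_of_neg (by simpa using h)]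

-- the 'arr[key(e)].append(val(e))' loop collects matching edges in order
theorem pv_foldl_append_getD (l : List (List Int)) (key val' : List Int → Int)
    (arr : List (List Int)) (x : Int)
    (hb : ∀ e ∈ l, 0 ≤ key e ∧ key e < (arr.length : Int))
    (hx0 : 0 ≤ x) (hx : x < (arr.length : Int)) :
    PySem.List.pyGetD
        (l.foldl (fun a e => PySem.List.pySetD a (key e) (PySem.List.pyGetD a (key e) [] ++ [val' e])) arr)
        x []
      = PySem.List.pyGetD arr x [] ++ (l.filter (fun e => key e == x)).map val' := by
  induction l generalizing arr with
  | nil => simp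
  | cons e t ih =>
    have hbe := hb e (by simp)
    have hlen : ((PySem.List.pySetD arr (key e) (PySem.List.pyGetD arr (key e) [] ++ [val' e])).length : Int)
        = (arr.length : Int) := by rw [PySem.List.length_pySetD]
    simp only [List.foldl_cons]
    rw [ih _ (fun e' he' => by rw [hlen]; exact hb e' (by simp [he'])) (by rw [hlen]; exact hx),
        pv_pyGetD_pySetD arr (key e) x _ [] hbe.1 hbe.2 hx0 hx]
    by_cases h : (key e == x) = true
    · have hk : key e = x := by simpa using h
      rw [if_pos hk.symm, List.filter_cons_of_pos (by simpa using h), hk]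
      simp
    · have hk : ¬ (x = key e) := fun hh => h (by simp [hh])
      rw [if_neg hk, List.filter_cons_of_neg (by simpa using h)]

-- the 'arr[key(e)] = val(e)' loop keeps the LAST matching write
theorem pv_foldl_write_getD (l : List (List Int)) (key val' : List Int → Int)
    (arr : List Int) (x : Int)
    (hb : ∀ e ∈ l, 0 ≤ key e ∧ key e < (arr.length : Int))
    (hx0 : 0 ≤ x) (hx : x < (arr.length : Int)) :
    PySem.List.pyGetD (l.foldl (fun a e => PySem.List.pySetD a (key e) (val' e)) arr) x 0
      = ((l.filter (fun e => key e == x)).map val').getLastD (PySem.List.pyGetD arr x 0) := by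
  induction l generalizing arr with
  | nil => simp
  | cons e t ih =>
    have hbe := hb e (by simp)
    have hlen : ((PySem.List.pySetD arr (key e) (val' e)).length : Int)
        = (arr.length : Int) := by rw [PySem.List.length_pySetD]
    simp only [List.foldl_cons]
    rw [ih _ (fun e' he' => by rw [hlen]; exact hb e' (by simp [he'])) (by rw [hlen]; exact hx),
        pv_pyGetD_pySetD arr (key e) x _ 0 hbe.1 hbe.2 hx0 hx]
    by_cases h : (key e == x) = true
    · have hk : key e = x := by simpa using h
      rw [if_pos hk.symm, List.filter_cons_of_pos (by simpa using h), List.map_cons,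
          List.getLastD_cons]
    · have hk : ¬ (x = key e) := fun hh => h (by simp [hh])
      rw [if_neg hk, List.filter_cons_of_neg (by simpa using h)]

-- split A's single build loop into its three independent folds
theorem pvBuildA_eq (edges : List (List Int)) :
    pvBuildA edges =
      (edges.foldl (fun a e => PySem.List.pySetD a (pvU e) (PySem.List.pyGetD a (pvU e) [] ++ [pvV e]))
         (List.replicate (pvMax edges + 1).toNat []),
       edges.foldl (fun a e => PySem.List.pySetD a (pvU e) (PySem.List.pyGetD a (pvU e) 0 + 1))
         (List.replicate (pvMax edges + 1).toNat 0),
       edges.foldl (fun a e => PySem.List.pySetD a (pvV e) (PySem.List.pyGetD a (pvV e) 0 + 1))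
         (List.replicate (pvMax edges + 1).toNat 0)) := by
  unfold pvBuildA
  rw [PySem.List.foldl_prod_mk
        (f := fun a e => PySem.List.pySetD a (pvU e) (PySem.List.pyGetD a (pvU e) [] ++ [pvV e]))
        (g := fun s e => (PySem.List.pySetD s.1 (pvU e) (PySem.List.pyGetD s.1 (pvU e) 0 + 1),
                          PySem.List.pySetD s.2 (pvV e) (PySem.List.pyGetD s.2 (pvV e) 0 + 1))),
      PySem.List.foldl_prod_mk
        (f := fun a e => PySem.List.pySetD a (pvU e) (PySem.List.pyGetD a (pvU e) 0 + 1))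
        (g := fun a e => PySem.List.pySetD a (pvV e) (PySem.List.pyGetD a (pvV e) 0 + 1))]

-- split B's single build loop into its three independent folds
theorem pvBuildB_eq (edges : List (List Int)) :
    pvBuildB edges =
      (edges.foldl (fun a e => PySem.List.pySetD a (pvU e) (PySem.List.pyGetD a (pvU e) 0 + 1))
         (List.replicate (pvMax edges + 1).toNat 0),
       edges.foldl (fun a e => PySem.List.pySetD a (pvV e) (PySem.List.pyGetD a (pvV e) 0 + 1))
         (List.replicate (pvMax edges + 1).toNat 0),
       edges.foldl (fun a e => PySem.List.pySetD a (pvU e) (pvV e))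
         (List.replicate (pvMax edges + 1).toNat 0)) := by
  unfold pvBuildB
  rw [PySem.List.foldl_prod_mk
        (f := fun a e => PySem.List.pySetD a (pvU e) (PySem.List.pyGetD a (pvU e) 0 + 1))
        (g := fun s e => (PySem.List.pySetD s.1 (pvV e) (PySem.List.pyGetD s.1 (pvV e) 0 + 1),
                          PySem.List.pySetD s.2 (pvU e) (pvV e))),
      PySem.List.foldl_prod_mk
        (f := fun a e => PySem.List.pySetD a (pvV e) (PySem.List.pyGetD a (pvV e) 0 + 1))
        (g := fun a e => PySem.List.pySetD a (pvU e) (pvV e))]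

-- wellformedness shorthand
def pvWF (edges : List (List Int)) : Prop :=
  ∀ e ∈ edges, e.length = 2 ∧ 0 ≤ pvU e ∧ 0 ≤ pvV e

theorem pv_replicate_len (edges : List (List Int)) {α : Type} (c : α) :
    ((List.replicate (pvMax edges + 1).toNat c).length : Int) = pvMax edges + 1 := by
  have := pvMax_nonneg edges
  simp; omega

theorem pvA_out (edges : List (List Int)) (hwf : pvWF edges) (x : Int)
    (hx0 : 0 ≤ x) (hx : x ≤ pvMax edges) :
    PySem.List.pyGetD (pvBuildA edges).2.1 x 0 = pvOut edges x := by
  rw [pvBuildA_eq]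
  have hb : ∀ e ∈ edges, 0 ≤ pvU e ∧ pvU e < ((List.replicate (pvMax edges + 1).toNat (0:Int)).length : Int) := by
    intro e he
    rw [pv_replicate_len]
    exact ⟨(hwf e he).2.1, by have := (mem_le_pvMax he).1; omega⟩
  rw [pv_foldl_incr_getD edges pvU _ x hb hx0 (by rw [pv_replicate_len]; omega)]
  rw [PySem.List.pyGetD_eq_getElem _ 0 hx0 (by have := pv_replicate_len edges (0:Int); omega)]
  simp [pvOut]

theorem pvA_in (edges : List (List Int)) (hwf : pvWF edges) (x : Int)
    (hx0 : 0 ≤ x) (hx : x ≤ pvMax edges) :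
    PySem.List.pyGetD (pvBuildA edges).2.2 x 0 = pvIn edges x := by
  rw [pvBuildA_eq]
  have hb : ∀ e ∈ edges, 0 ≤ pvV e ∧ pvV e < ((List.replicate (pvMax edges + 1).toNat (0:Int)).length : Int) := by
    intro e he
    rw [pv_replicate_len]
    exact ⟨(hwf e he).2.2, by have := (mem_le_pvMax he).2; omega⟩
  rw [pv_foldl_incr_getD edges pvV _ x hb hx0 (by rw [pv_replicate_len]; omega)]
  rw [PySem.List.pyGetD_eq_getElem _ 0 hx0 (by have := pv_replicate_len edges (0:Int); omega)]
  simp [pvIn]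

theorem pvA_nodes (edges : List (List Int)) (hwf : pvWF edges) (x : Int)
    (hx0 : 0 ≤ x) (hx : x ≤ pvMax edges) :
    PySem.List.pyGetD (pvBuildA edges).1 x [] = pvSucc edges x := by
  rw [pvBuildA_eq]
  have hb : ∀ e ∈ edges, 0 ≤ pvU e ∧ pvU e < ((List.replicate (pvMax edges + 1).toNat ([]:List Int)).length : Int) := by
    intro e he
    rw [pv_replicate_len]
    exact ⟨(hwf e he).2.1, by have := (mem_le_pvMax he).1; omega⟩
  rw [pv_foldl_append_getD edges pvU pvV _ x hb hx0 (by rw [pv_replicate_len]; omega)]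
  rw [PySem.List.pyGetD_eq_getElem _ [] hx0 (by have := pv_replicate_len edges ([]:List Int); omega)]
  simp [pvSucc]

theorem pvB_out (edges : List (List Int)) (hwf : pvWF edges) (x : Int)
    (hx0 : 0 ≤ x) (hx : x ≤ pvMax edges) :
    PySem.List.pyGetD (pvBuildB edges).1 x 0 = pvOut edges x := by
  rw [pvBuildB_eq]
  have hb : ∀ e ∈ edges, 0 ≤ pvU e ∧ pvU e < ((List.replicate (pvMax edges + 1).toNat (0:Int)).length : Int) := by
    intro e he
    rw [pv_replicate_len]
    exact ⟨(hwf e he).2.1, by have := (mem_le_pvMax he).1; omega⟩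
  rw [pv_foldl_incr_getD edges pvU _ x hb hx0 (by rw [pv_replicate_len]; omega)]
  rw [PySem.List.pyGetD_eq_getElem _ 0 hx0 (by have := pv_replicate_len edges (0:Int); omega)]
  simp [pvOut]

theorem pvB_in (edges : List (List Int)) (hwf : pvWF edges) (x : Int)
    (hx0 : 0 ≤ x) (hx : x ≤ pvMax edges) :
    PySem.List.pyGetD (pvBuildB edges).2.1 x 0 = pvIn edges x := by
  rw [pvBuildB_eq]
  have hb : ∀ e ∈ edges, 0 ≤ pvV e ∧ pvV e < ((List.replicate (pvMax edges + 1).toNat (0:Int)).length : Int) := by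
    intro e he
    rw [pv_replicate_len]
    exact ⟨(hwf e he).2.2, by have := (mem_le_pvMax he).2; omega⟩
  rw [pv_foldl_incr_getD edges pvV _ x hb hx0 (by rw [pv_replicate_len]; omega)]
  rw [PySem.List.pyGetD_eq_getElem _ 0 hx0 (by have := pv_replicate_len edges (0:Int); omega)]
  simp [pvIn]

-- for an out-degree-1 node the last write into nxt[] is THE successor
theorem pvB_nxt (edges : List (List Int)) (hwf : pvWF edges) (x : Int)
    (hx0 : 0 ≤ x) (hx : x ≤ pvMax edges) (h1 : pvOut edges x = 1) :
    PySem.List.pyGetD (pvBuildB edges).2.2 x 0 = pvNext edges x := by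
  rw [pvBuildB_eq]
  have hb : ∀ e ∈ edges, 0 ≤ pvU e ∧ pvU e < ((List.replicate (pvMax edges + 1).toNat (0:Int)).length : Int) := by
    intro e he
    rw [pv_replicate_len]
    exact ⟨(hwf e he).2.1, by have := (mem_le_pvMax he).1; omega⟩
  rw [pv_foldl_write_getD edges pvU pvV _ x hb hx0 (by rw [pv_replicate_len]; omega)]
  have hlen : (edges.filter (fun e => pvU e == x)).length = 1 := by
    simpa [pvOut] using h1
  obtain ⟨e, he⟩ := List.length_eq_one_iff.mp hlen
  simp [pvNext, pvSucc, he]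

theorem pvCreatedA_eq (edges : List (List Int)) (hwf : pvWF edges) :
    pvCreatedA edges = pvCreated edges := by
  have h : (PySem.List.pyRange 1 (pvMax edges + 1) 1).find? (fun i =>
        decide (2 ≤ PySem.List.pyGetD (pvBuildA edges).2.1 i 0) &&
        decide (PySem.List.pyGetD (pvBuildA edges).2.2 i 0 = 0))
      = (PySem.List.pyRange 1 (pvMax edges + 1) 1).find? (fun i =>
        decide (2 ≤ pvOut edges i) && decide (pvIn edges i = 0)) := by
    refine pv_find?_congr _ _ _ (fun i hi => ?_)
    have hib := (PySem.List.mem_pyRange_one).mp hi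
    rw [pvA_out edges hwf i (by omega) (by omega), pvA_in edges hwf i (by omega) (by omega)]
  unfold pvCreatedA pvCreated
  rw [h]

theorem pvCreatedB_eq (edges : List (List Int)) (hwf : pvWF edges) :
    pvCreatedB edges = pvCreated edges := by
  have h : (PySem.List.pyRange 1 (pvMax edges + 1) 1).find? (fun i =>
        decide (2 ≤ PySem.List.pyGetD (pvBuildB edges).1 i 0) &&
        decide (PySem.List.pyGetD (pvBuildB edges).2.1 i 0 = 0))
      = (PySem.List.pyRange 1 (pvMax edges + 1) 1).find? (fun i =>
        decide (2 ≤ pvOut edges i) && decide (pvIn edges i = 0)) := by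
    refine pv_find?_congr _ _ _ (fun i hi => ?_)
    have hib := (PySem.List.mem_pyRange_one).mp hi
    rw [pvB_out edges hwf i (by omega) (by omega), pvB_in edges hwf i (by omega) (by omega)]
  unfold pvCreatedB pvCreated
  rw [h]

theorem pvCreated_bounds (edges : List (List Int)) :
    0 ≤ pvCreated edges ∧ pvCreated edges ≤ pvMax edges := by
  unfold pvCreated
  cases hfind : (PySem.List.pyRange 1 (pvMax edges + 1) 1).find? (fun i =>
      decide (2 ≤ pvOut edges i) && decide (pvIn edges i = 0)) with
  | none => simpa using pvMax_nonneg edges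
  | some i =>
    have := (PySem.List.mem_pyRange_one).mp (List.mem_of_find?_eq_some hfind)
    simpa using by omega

theorem mem_pvSucc_bounds {edges : List (List Int)} (hwf : pvWF edges) {x v : Int}
    (hv : v ∈ pvSucc edges x) : 0 ≤ v ∧ v ≤ pvMax edges := by
  unfold pvSucc at hv
  rcases List.mem_map.mp hv with ⟨e, he, rfl⟩
  have hem := List.mem_of_mem_filter he
  exact ⟨(hwf e hem).2.2, (mem_le_pvMax hem).2⟩

theorem pvOut_eq_len (edges : List (List Int)) (x : Int) :
    pvOut edges x = ((pvSucc edges x).length : Int) := by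
  simp [pvOut, pvSucc]

theorem pvOut_nonneg (edges : List (List Int)) (x : Int) : 0 ≤ pvOut edges x :=
  Int.natCast_nonneg _

theorem pvNext_mem {edges : List (List Int)} {x : Int} (h : pvOut edges x = 1) :
    pvNext edges x ∈ pvSucc edges x := by
  have hlen : (pvSucc edges x).length = 1 := by
    have := pvOut_eq_len edges x; omega
  unfold pvNext
  cases hs : pvSucc edges x with
  | nil => simp [hs] at hlen
  | cons a t => simp

theorem pvIter_bounds {edges : List (List Int)} (hwf : pvWF edges) {s : Int} {k : Nat}
    (hs : 0 ≤ s ∧ s ≤ pvMax edges)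
    (hdeg : ∀ j < k, pvOut edges (pvIter edges j s) = 1) :
    ∀ t ≤ k, 0 ≤ pvIter edges t s ∧ pvIter edges t s ≤ pvMax edges := by
  intro t
  induction t with
  | zero => intro _; exact hs
  | succ n ih =>
    intro hn
    have h1 := hdeg n (by omega)
    have hmem := pvNext_mem h1
    show 0 ≤ pvNext edges (pvIter edges n s) ∧ _
    exact mem_pvSucc_bounds hwf hmem

-- iterating the successor map composes additively
theorem pvIter_add (edges : List (List Int)) (a b : Nat) (s : Int) :
    pvIter edges (a + b) s = pvIter edges a (pvIter edges b s) := by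
  induction a with
  | zero => simp [pvIter]
  | succ n ih =>
    have : n + 1 + b = (n + b) + 1 := by omega
    rw [this]
    show pvNext edges (pvIter edges (n + b) s) = pvIter edges (n + 1) (pvIter edges b s)
    rw [ih]
    rfl

theorem pvIter_succ_left (edges : List (List Int)) (k : Nat) (s : Int) :
    pvIter edges (k + 1) s = pvIter edges k (pvNext edges s) := by
  have h : k + 1 = k + 1 := rfl
  have := pvIter_add edges k 1 s
  simpa [pvIter] using this

-- the chain from s first leaves the out-degree-1 nodes at step k
def pvReach (edges : List (List Int)) (s : Int) (k : Nat) : Prop :=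
  (∀ j < k, pvOut edges (pvIter edges j s) = 1) ∧ pvOut edges (pvIter edges k s) ≠ 1

theorem pvReach_unique {edges : List (List Int)} {s : Int} {k k' : Nat}
    (h : pvReach edges s k) (h' : pvReach edges s k') : k = k' := by
  by_contra hne
  rcases Nat.lt_or_ge k k' with hlt | hge
  · exact h.2 (h'.1 k hlt)
  · exact h'.2 (h.1 k' (by omega))

theorem pvReach_shift {edges : List (List Int)} {s : Int} {k : Nat}
    (h : pvReach edges s (k + 1)) :
    pvOut edges s = 1 ∧ pvReach edges (pvNext edges s) k := by
  refine ⟨by simpa [pvIter] using h.1 0 (by omega), ⟨fun j hj => ?_, ?_⟩⟩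
  · have := h.1 (j + 1) (by omega)
    rwa [pvIter_succ_left] at this
  · have := h.2
    rwa [pvIter_succ_left] at this

-- on a pure out-degree-1 cycle through s, every iterate has out-degree 1
theorem pv_cycle_all_one {edges : List (List Int)} {s : Int} {k : Nat}
    (hk0 : 0 < k) (hks : pvIter edges k s = s)
    (hdeg : ∀ j < k, pvOut edges (pvIter edges j s) = 1) :
    ∀ j, pvOut edges (pvIter edges j s) = 1 := by
  intro j
  induction j using Nat.strong_induction_on with
  | _ j ih =>
    by_cases hj : j < k
    · exact hdeg j hj
    · have hjk : j - k + k = j := by omega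
      have : pvIter edges j s = pvIter edges (j - k) s := by
        conv_lhs => rw [← hjk]
        rw [pvIter_add, hks]
      rw [this]
      exact ih (j - k) (by omega)

-- a value the propagation may hold at node s: 0 (unresolved) or the end class of its chain
def pvSound (edges : List (List Int)) (s c : Int) : Prop :=
  c = 0 ∨ ∃ k, pvReach edges s k ∧
    c = (if pvOut edges (pvIter edges k s) = 0 then 1 else 2)

-- invariant of the label array
def pvInv (edges : List (List Int)) (cls : List Int) : Prop :=
  cls.length = (pvMax edges + 1).toNat ∧
  ∀ x : Int, 0 ≤ x → x ≤ pvMax edges → pvSound edges x (PySem.List.pyGetD cls x 0)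

theorem pv_len_int (edges : List (List Int)) {cls : List Int}
    (h : cls.length = (pvMax edges + 1).toNat) : (cls.length : Int) = pvMax edges + 1 := by
  have := pvMax_nonneg edges
  omega

-- the 'if ...: cls[x] = 1 elif ...: cls[x] = 2' initialisation, pointwise
theorem pv_fold_init_getD (g : Int → Int) (l : List Int) (n : Nat) (hnd : l.Nodup) :
    ∀ (arr : List Int), arr.length = n → (∀ e ∈ l, 0 ≤ e ∧ e < (n : Int)) →
    ∀ y : Int, 0 ≤ y → y < (n : Int) →
    PySem.List.pyGetD
        (l.foldl (fun cls x =>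
          if g x = 0 then PySem.List.pySetD cls x 1
          else if 2 ≤ g x then PySem.List.pySetD cls x 2
          else cls) arr) y 0
      = if y ∈ l then
          (if g y = 0 then 1 else if 2 ≤ g y then 2 else PySem.List.pyGetD arr y 0)
        else PySem.List.pyGetD arr y 0 := by
  induction l with
  | nil => intro arr _ _ y _ _; simp
  | cons a t ih =>
    intro arr hlen hb y hy0 hy
    have hba := hb a (by simp)
    have hlenI : (arr.length : Int) = (n : Int) := by omega
    have hstep : ∀ z : Int, 0 ≤ z → z < (n : Int) →
        PySem.List.pyGetD
          (if g a = 0 then PySem.List.pySetD arr a 1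
           else if 2 ≤ g a then PySem.List.pySetD arr a 2
           else arr) z 0
        = if z = a then (if g a = 0 then 1 else if 2 ≤ g a then 2 else PySem.List.pyGetD arr a 0)
          else PySem.List.pyGetD arr z 0 := by
      intro z hz0 hz
      by_cases h1 : g a = 0
      · rw [if_pos h1, pv_pyGetD_pySetD arr a z 1 0 hba.1 (by omega) hz0 (by omega)]
        by_cases hza : z = a <;> simp [hza, h1]
      · rw [if_neg h1]
        by_cases h2 : 2 ≤ g a
        · rw [if_pos h2, pv_pyGetD_pySetD arr a z 2 0 hba.1 (by omega) hz0 (by omega)]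
          by_cases hza : z = a <;> simp [hza, h1, h2]
        · rw [if_neg h2]
          by_cases hza : z = a <;> simp [hza, h1, h2]
    have hlen' : (if g a = 0 then PySem.List.pySetD arr a 1
        else if 2 ≤ g a then PySem.List.pySetD arr a 2 else arr).length = n := by
      split_ifs <;> simp [PySem.List.length_pySetD, hlen]
    simp only [List.foldl_cons]
    rw [ih (List.Nodup.of_cons hnd) _ hlen' (fun e he => hb e (by simp [he])) y hy0 hy]
    have hanot : a ∉ t := (List.nodup_cons.mp hnd).1
    by_cases hyt : y ∈ t
    · have hya : y ≠ a := fun h => hanot (h ▸ hyt)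
      rw [if_pos hyt, hstep y hy0 hy]
      simp [hyt, hya]
    · rw [if_neg hyt, hstep y hy0 hy]
      by_cases hya : y = a
      · subst hya
        simp [hyt]
      · simp [hyt, hya]

theorem pv_foldl_len_pres {α : Type} (f : List Int → α → List Int)
    (h : ∀ c x, (f c x).length = c.length) :
    ∀ (l : List α) (c : List Int), (l.foldl f c).length = c.length := by
  intro l
  induction l with
  | nil => intro c; rfl
  | cons a t ih => intro c; rw [List.foldl_cons, ih, h]

theorem pv_clsInit_len (edges : List (List Int)) :
    (pvClsInit edges).length = (pvMax edges + 1).toNat := by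
  unfold pvClsInit
  rw [pv_foldl_len_pres _ (fun c x => by split_ifs <;> simp [PySem.List.length_pySetD])]
  simp

theorem pv_clsInit_getD (edges : List (List Int)) (hwf : pvWF edges) (y : Int)
    (hy0 : 0 ≤ y) (hy : y ≤ pvMax edges) :
    PySem.List.pyGetD (pvClsInit edges) y 0
      = if pvOut edges y = 0 then 1 else if 2 ≤ pvOut edges y then 2 else 0 := by
  have hM := pvMax_nonneg edges
  unfold pvClsInit
  rw [pv_fold_init_getD (fun x => PySem.List.pyGetD (pvBuildB edges).1 x 0)
      (PySem.List.pyRange 0 (pvMax edges + 1) 1) ((pvMax edges + 1).toNat)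
      (PySem.List.nodup_pyRange_one 0 (pvMax edges + 1))
      (List.replicate (pvMax edges + 1).toNat 0) (by simp)
      (fun e he => by have := (PySem.List.mem_pyRange_one).mp he; omega)
      y hy0 (by omega)]
  rw [if_pos ((PySem.List.mem_pyRange_one).mpr ⟨hy0, by omega⟩)]
  rw [pvB_out edges hwf y hy0 hy]
  have hz : PySem.List.pyGetD (List.replicate (pvMax edges + 1).toNat (0:Int)) y 0 = 0 := by
    rw [PySem.List.pyGetD_eq_getElem _ 0 hy0 (by have := pv_replicate_len edges (0:Int); omega)]
    simp
  rw [hz]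

-- one relaxation round preserves the invariant
theorem pv_passfold_inv (edges : List (List Int)) (hwf : pvWF edges) :
    ∀ (l : List Int) (cls : List Int), (∀ e ∈ l, 0 ≤ e ∧ e ≤ pvMax edges) → pvInv edges cls →
      pvInv edges (l.foldl (fun cls x =>
        if PySem.List.pyGetD cls x 0 = 0 ∧ PySem.List.pyGetD (pvBuildB edges).1 x 0 = 1 then
          PySem.List.pySetD cls x
            (PySem.List.pyGetD cls (PySem.List.pyGetD (pvBuildB edges).2.2 x 0) 0)
        else cls) cls) := by
  intro l
  induction l with
  | nil => intro cls _ hinv; exact hinv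
  | cons a t ih =>
    intro cls hb hinv
    have hba := hb a (by simp)
    have hbt : ∀ e ∈ t, 0 ≤ e ∧ e ≤ pvMax edges := fun e he => hb e (by simp [he])
    have hlenI : (cls.length : Int) = pvMax edges + 1 := pv_len_int edges hinv.1
    simp only [List.foldl_cons]
    by_cases hg : PySem.List.pyGetD cls a 0 = 0 ∧ PySem.List.pyGetD (pvBuildB edges).1 a 0 = 1
    · rw [if_pos hg]
      have hout : pvOut edges a = 1 :=
        (pvB_out edges hwf a hba.1 hba.2).symm.trans hg.2
      have hnx : PySem.List.pyGetD (pvBuildB edges).2.2 a 0 = pvNext edges a :=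
        pvB_nxt edges hwf a hba.1 hba.2 hout
      rw [hnx]
      have hnb := mem_pvSucc_bounds hwf (pvNext_mem hout)
      have hsn := hinv.2 (pvNext edges a) hnb.1 hnb.2
      refine ih _ hbt ⟨by rw [PySem.List.length_pySetD]; exact hinv.1, ?_⟩
      intro x hx0 hx1
      rw [pv_pyGetD_pySetD cls a x _ 0 hba.1 (by omega) hx0 (by omega)]
      by_cases hxa : x = a
      · rw [if_pos hxa]; subst hxa
        rcases hsn with h0 | ⟨k, hr, hv⟩
        · exact Or.inl h0
        · refine Or.inr ⟨k+1, ⟨?_, ?_⟩, ?_⟩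
          · intro j hj
            cases j with
            | zero => simpa [pvIter] using hout
            | succ i => rw [pvIter_succ_left]; exact hr.1 i (by omega)
          · rw [pvIter_succ_left]; exact hr.2
          · rw [pvIter_succ_left]; exact hv
      · rw [if_neg hxa]; exact hinv.2 x hx0 hx1
    · rw [if_neg hg]; exact ih _ hbt hinv

-- nonzero labels persist through a round, and a round resolves any out-degree-1
-- node whose successor is already resolved
theorem pv_passfold_nonzero (edges : List (List Int)) (hwf : pvWF edges) :
    ∀ (l : List Int) (cls : List Int), (∀ e ∈ l, 0 ≤ e ∧ e ≤ pvMax edges) →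
      cls.length = (pvMax edges + 1).toNat →
      (∀ y : Int, 0 ≤ y → y ≤ pvMax edges → PySem.List.pyGetD cls y 0 ≠ 0 →
        PySem.List.pyGetD (l.foldl (fun cls x =>
          if PySem.List.pyGetD cls x 0 = 0 ∧ PySem.List.pyGetD (pvBuildB edges).1 x 0 = 1 then
            PySem.List.pySetD cls x
              (PySem.List.pyGetD cls (PySem.List.pyGetD (pvBuildB edges).2.2 x 0) 0)
          else cls) cls) y 0 ≠ 0) ∧
      (∀ x ∈ l, pvOut edges x = 1 →
        PySem.List.pyGetD cls (pvNext edges x) 0 ≠ 0 →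
        PySem.List.pyGetD (l.foldl (fun cls x =>
          if PySem.List.pyGetD cls x 0 = 0 ∧ PySem.List.pyGetD (pvBuildB edges).1 x 0 = 1 then
            PySem.List.pySetD cls x
              (PySem.List.pyGetD cls (PySem.List.pyGetD (pvBuildB edges).2.2 x 0) 0)
          else cls) cls) x 0 ≠ 0) := by
  intro l
  induction l with
  | nil =>
    intro cls _ _
    exact ⟨fun y _ _ h => h, fun x hx => absurd hx (by simp)⟩
  | cons a t ih =>
    intro cls hb hlen
    have hba := hb a (by simp)
    have hbt : ∀ e ∈ t, 0 ≤ e ∧ e ≤ pvMax edges := fun e he => hb e (by simp [he])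
    have hlenI : (cls.length : Int) = pvMax edges + 1 := pv_len_int edges hlen
    have hmono1 : ∀ y : Int, 0 ≤ y → y ≤ pvMax edges → PySem.List.pyGetD cls y 0 ≠ 0 →
        PySem.List.pyGetD
          (if PySem.List.pyGetD cls a 0 = 0 ∧ PySem.List.pyGetD (pvBuildB edges).1 a 0 = 1 then
            PySem.List.pySetD cls a
              (PySem.List.pyGetD cls (PySem.List.pyGetD (pvBuildB edges).2.2 a 0) 0)
          else cls) y 0 ≠ 0 := by
      intro y hy0 hy1 hy
      by_cases hg : PySem.List.pyGetD cls a 0 = 0 ∧ PySem.List.pyGetD (pvBuildB edges).1 a 0 = 1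
      · rw [if_pos hg, pv_pyGetD_pySetD cls a y _ 0 hba.1 (by omega) hy0 (by omega)]
        by_cases hya : y = a
        · subst hya; exact absurd hg.1 hy
        · rw [if_neg hya]; exact hy
      · rw [if_neg hg]; exact hy
    have hlen' :
        (if PySem.List.pyGetD cls a 0 = 0 ∧ PySem.List.pyGetD (pvBuildB edges).1 a 0 = 1 then
            PySem.List.pySetD cls a
              (PySem.List.pyGetD cls (PySem.List.pyGetD (pvBuildB edges).2.2 a 0) 0)
          else cls).length = (pvMax edges + 1).toNat := by
      split_ifs <;> simp [PySem.List.length_pySetD, hlen]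
    simp only [List.foldl_cons]
    constructor
    · intro y hy0 hy1 hy
      exact (ih _ hbt hlen').1 y hy0 hy1 (hmono1 y hy0 hy1 hy)
    · intro x hx hout hnz
      rcases List.mem_cons.mp hx with rfl | hxt
      · refine (ih _ hbt hlen').1 x hba.1 hba.2 ?_
        by_cases hg : PySem.List.pyGetD cls x 0 = 0 ∧ PySem.List.pyGetD (pvBuildB edges).1 x 0 = 1
        · rw [if_pos hg, pv_pyGetD_pySetD cls x x _ 0 hba.1 (by omega) hba.1 (by omega), if_pos rfl,
              pvB_nxt edges hwf x hba.1 hba.2 hout]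
          exact hnz
        · rw [if_neg hg]
          have houtB : PySem.List.pyGetD (pvBuildB edges).1 x 0 = 1 :=
            (pvB_out edges hwf x hba.1 hba.2).trans hout
          intro h0
          exact hg ⟨h0, houtB⟩
      · have hnb := mem_pvSucc_bounds hwf (pvNext_mem hout)
        exact (ih _ hbt hlen').2 x hxt hout (hmono1 _ hnb.1 hnb.2 hnz)

theorem pv_foldl_const_eq_iterate {α β : Type} (f : β → β) (l : List α) (c : β) :
    l.foldl (fun c _ => f c) c = f^[l.length] c := by
  induction l generalizing c with
  | nil => rfl
  | cons a t ih => simpa [Function.iterate_succ_apply] using ih (f c)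

theorem pv_iterate_inv (edges : List (List Int)) (hwf : pvWF edges) :
    ∀ r, pvInv edges ((pvPass edges)^[r] (pvClsInit edges)) := by
  intro r
  induction r with
  | zero =>
    simp only [Function.iterate_zero, id]
    refine ⟨pv_clsInit_len edges, ?_⟩
    intro x hx0 hx1
    rw [pv_clsInit_getD edges hwf x hx0 hx1]
    by_cases h0 : pvOut edges x = 0
    · rw [if_pos h0]
      exact Or.inr ⟨0, ⟨fun j hj => absurd hj (by omega),
        by show pvOut edges x ≠ 1; omega⟩, by show (1:Int) = _; simp [pvIter, h0]⟩
    · rw [if_neg h0]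
      by_cases h2 : 2 ≤ pvOut edges x
      · rw [if_pos h2]
        refine Or.inr ⟨0, ⟨fun j hj => absurd hj (by omega),
          by show pvOut edges x ≠ 1; omega⟩, ?_⟩
        show (2:Int) = if pvOut edges (pvIter edges 0 x) = 0 then 1 else 2
        have : pvOut edges (pvIter edges 0 x) = pvOut edges x := rfl
        rw [this, if_neg h0]
      · rw [if_neg h2]; exact Or.inl rfl
  | succ r ih =>
    rw [Function.iterate_succ_apply']
    show pvInv edges (pvPass edges _)
    unfold pvPass
    exact pv_passfold_inv edges hwf _ _
      (fun e he => by
        have := (PySem.List.mem_pyRange_one).mp he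
        exact ⟨this.1, by omega⟩) ih

theorem pv_iterate_complete (edges : List (List Int)) (hwf : pvWF edges) :
    ∀ r (x : Int) (k : Nat), 0 ≤ x → x ≤ pvMax edges → k ≤ r → pvReach edges x k →
      PySem.List.pyGetD ((pvPass edges)^[r] (pvClsInit edges)) x 0 ≠ 0 := by
  intro r
  induction r with
  | zero =>
    intro x k hx0 hx1 hkr hreach
    have hk0 : k = 0 := by omega
    subst hk0
    simp only [Function.iterate_zero, id]
    rw [pv_clsInit_getD edges hwf x hx0 hx1]
    have hne : pvOut edges x ≠ 1 := hreach.2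
    have hnn := pvOut_nonneg edges x
    split_ifs with ha hb2 <;> omega
  | succ r ih =>
    intro x k hx0 hx1 hkr hreach
    rw [Function.iterate_succ_apply']
    have hinv := pv_iterate_inv edges hwf r
    have hbR : ∀ e ∈ PySem.List.pyRange 0 (pvMax edges + 1) 1, 0 ≤ e ∧ e ≤ pvMax edges :=
      fun e he => by
        have := (PySem.List.mem_pyRange_one).mp he
        exact ⟨this.1, by omega⟩
    by_cases hk : k ≤ r
    · have hprev := ih x k hx0 hx1 hk hreach
      show PySem.List.pyGetD (pvPass edges _) x 0 ≠ 0
      unfold pvPass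
      exact (pv_passfold_nonzero edges hwf _ _ hbR hinv.1).1 x hx0 hx1 hprev
    · have hk1 : k = r + 1 := by omega
      subst hk1
      obtain ⟨hout, hrn⟩ := pvReach_shift hreach
      have hnb := mem_pvSucc_bounds hwf (pvNext_mem hout)
      have hnz := ih (pvNext edges x) r hnb.1 hnb.2 (le_refl r) hrn
      show PySem.List.pyGetD (pvPass edges _) x 0 ≠ 0
      unfold pvPass
      exact (pv_passfold_nonzero edges hwf _ _ hbR hinv.1).2 x
        ((PySem.List.mem_pyRange_one).mpr ⟨hx0, by omega⟩) hout hnz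

theorem pv_clsFinal_eq_iterate (edges : List (List Int)) :
    pvClsFinal edges = (pvPass edges)^[(pvMax edges + 2).toNat] (pvClsInit edges) := by
  unfold pvClsFinal
  rw [pv_foldl_const_eq_iterate, PySem.List.length_pyRange_one]
  norm_num

theorem pv_cls_reach (edges : List (List Int)) (hwf : pvWF edges) (s : Int)
    (hs0 : 0 ≤ s) (hs1 : s ≤ pvMax edges) (k : Nat)
    (hk : k ≤ (pvMax edges + 2).toNat) (hreach : pvReach edges s k) :
    PySem.List.pyGetD (pvClsFinal edges) s 0
      = if pvOut edges (pvIter edges k s) = 0 then 1 else 2 := by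
  rw [pv_clsFinal_eq_iterate]
  have hnz := pv_iterate_complete edges hwf ((pvMax edges + 2).toNat) s k hs0 hs1 hk hreach
  have hinv := (pv_iterate_inv edges hwf ((pvMax edges + 2).toNat)).2 s hs0 hs1
  rcases hinv with h0 | ⟨k', hreach', hval⟩
  · exact absurd h0 hnz
  · rw [hval, pvReach_unique hreach' hreach]

theorem pv_cls_cycle (edges : List (List Int)) (hwf : pvWF edges) (s : Int)
    (hs0 : 0 ≤ s) (hs1 : s ≤ pvMax edges)
    (hall : ∀ j, pvOut edges (pvIter edges j s) = 1) :
    PySem.List.pyGetD (pvClsFinal edges) s 0 = 0 := by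
  rw [pv_clsFinal_eq_iterate]
  have hinv := (pv_iterate_inv edges hwf ((pvMax edges + 2).toNat)).2 s hs0 hs1
  rcases hinv with h0 | ⟨k', hreach', _⟩
  · exact h0
  · exact absurd (hall k') hreach'.2

-- A's while-loop, run from step t of the chain (reused from A's analysis)
def pvCase (edges : List (List Int)) (s : Int) (k : Nat) (c : Int) : Prop :=
  (pvOut edges (pvIter edges k s) ≠ 1 ∧
     ((List.range (k+1)).map (fun j => pvIter edges j s)).Nodup ∧
     c = (if pvOut edges (pvIter edges k s) = 0 then 1 else 2)) ∨
  (0 < k ∧ pvIter edges k s = s ∧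
     ((List.range k).map (fun j => pvIter edges j s)).Nodup ∧ c = 0)

theorem pv_nodup_map_range_ne {f : Nat → Int} {n i j : Nat}
    (h : ((List.range n).map f).Nodup) (hi : i < n) (hj : j < n) (hij : i ≠ j) :
    f i ≠ f j := by
  intro heq
  have h1 : ((List.range n).map f)[i]'(by simpa using hi) = ((List.range n).map f)[j]'(by simpa using hj) := by
    simp [heq]
  exact hij ((List.Nodup.getElem_inj_iff h).mp h1)

theorem walkA_run (edges : List (List Int)) (hwf : pvWF edges) (nodes : List (List Int))
    (hN : ∀ x, 0 ≤ x → x ≤ pvMax edges → PySem.List.pyGetD nodes x [] = pvSucc edges x)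
    (s : Int) (hs : 0 ≤ s ∧ s ≤ pvMax edges) (k : Nat)
    (hdeg : ∀ j < k, pvOut edges (pvIter edges j s) = 1) (c : Int)
    (hcase : pvCase edges s k c) :
    ∀ fuel t, t ≤ k → k + 2 ≤ fuel + t →
      walkA nodes s fuel (pvIter edges t s) (t : Int) = some c := by
  intro fuel
  induction fuel with
  | zero => intro t ht hf; omega
  | succ fuel ih =>
    intro t ht hf
    have hbt := pvIter_bounds hwf hs hdeg t ht
    have hnode := hN _ hbt.1 hbt.2
    have hlen : ((pvSucc edges (pvIter edges t s)).length : Int) = pvOut edges (pvIter edges t s) :=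
      (pvOut_eq_len edges _).symm
    rw [walkA, hnode]
    by_cases htk : t = k
    · subst htk
      rcases hcase with ⟨hne, _, hc⟩ | ⟨hk0, hks, _, hc⟩
      · by_cases h0 : pvOut edges (pvIter edges t s) = 0
        · rw [if_pos (by omega), hc, if_pos h0]
        · rw [if_neg (by omega), if_pos (by omega), hc, if_neg h0]
      · have h1 : pvOut edges (pvIter edges t s) = 1 := by
          rw [hks]
          have := hdeg 0 hk0
          simpa [pvIter] using this
        rw [if_neg (by omega), if_neg (by omega), if_pos ⟨hks, by push_cast; omega⟩, hc]
    · have htk' : t < k := by omega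
      have h1 := hdeg t htk'
      rw [if_neg (by omega), if_neg (by omega)]
      have hnotdonut : ¬ (pvIter edges t s = s ∧ (t : Int) + 1 > 1) := by
        rintro ⟨hts, htpos⟩
        have ht0 : 0 < t := by omega
        have hnd : ((List.range k).map (fun j => pvIter edges j s)).Nodup := by
          rcases hcase with ⟨_, hnd, _⟩ | ⟨_, _, hnd, _⟩
          · rw [List.range_succ, List.map_append] at hnd
            exact (List.nodup_append.mp hnd).1
          · exact hnd
        have := pv_nodup_map_range_ne hnd htk' (by omega) (by omega : t ≠ 0)
        exact this (by simpa [pvIter] using hts)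
      rw [if_neg hnotdonut]
      have hnext : PySem.List.pyGetD (pvSucc edges (pvIter edges t s)) 0 0
          = pvIter edges (t+1) s := by
        rw [PySem.List.pyGetD_zero]
        rfl
      rw [hnext]
      have := ih (t+1) (by omega) (by omega)
      simpa [Nat.cast_add] using this

-- for each start of a chain, A's walk returns exactly B's final label
theorem pv_walkA_cls (edges : List (List Int)) (hwf : pvWF edges)
    (hterm : ∀ s ∈ pvSucc edges (pvCreated edges),
      ∃ k ∈ List.range ((pvMax edges).toNat + 2),
        (∀ j ∈ List.range k, pvOut edges (pvIter edges j s) = 1) ∧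
        ((pvOut edges (pvIter edges k s) ≠ 1 ∧
            ((List.range (k+1)).map (fun j => pvIter edges j s)).Nodup) ∨
         (0 < k ∧ pvIter edges k s = s ∧
            ((List.range k).map (fun j => pvIter edges j s)).Nodup)))
    (s : Int) (hs : s ∈ pvSucc edges (pvCreated edges)) :
    walkA (pvBuildA edges).1 s ((pvMax edges + 1).toNat + 2) s 0
      = some (PySem.List.pyGetD (pvClsFinal edges) s 0) := by
  obtain ⟨k, hkmem, hdeg', hcase0⟩ := hterm s hs
  have hk : k < (pvMax edges).toNat + 2 := List.mem_range.mp hkmem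
  have hdeg : ∀ j < k, pvOut edges (pvIter edges j s) = 1 := fun j hj =>
    hdeg' j (List.mem_range.mpr hj)
  have hM0 := pvMax_nonneg edges
  have hsb := mem_pvSucc_bounds hwf hs
  obtain ⟨c, hcase, hcls⟩ :
      ∃ c, pvCase edges s k c ∧ PySem.List.pyGetD (pvClsFinal edges) s 0 = c := by
    rcases hcase0 with ⟨hne, hnd⟩ | ⟨hk0, hks, hnd⟩
    · refine ⟨if pvOut edges (pvIter edges k s) = 0 then 1 else 2,
        Or.inl ⟨hne, hnd, rfl⟩, ?_⟩
      exact pv_cls_reach edges hwf s hsb.1 hsb.2 k (by omega) ⟨hdeg, hne⟩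
    · refine ⟨0, Or.inr ⟨hk0, hks, hnd, rfl⟩, ?_⟩
      exact pv_cls_cycle edges hwf s hsb.1 hsb.2 (pv_cycle_all_one hk0 hks hdeg)
  rw [hcls]
  have := walkA_run edges hwf (pvBuildA edges).1
    (fun x h0 h1 => pvA_nodes edges hwf x h0 h1) s hsb k hdeg c hcase
    ((pvMax edges + 1).toNat + 2) 0 (by omega) (by omega)
  simpa [pvIter] using this

-- ===== VERDICT (by name: the statement is the Claim_ definition above) =====
theorem solution_spec : Claim_equal_solution := by
  intro edges _ hpre
  obtain ⟨hwf, hterm⟩ := hpre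
  show solution edges = solution_alt edges
  unfold solution solution_alt
  have hcb := pvCreated_bounds edges
  have hstartsA : PySem.List.pyGetD (pvBuildA edges).1 (pvCreated edges) []
      = pvSucc edges (pvCreated edges) := pvA_nodes edges hwf _ hcb.1 hcb.2
  simp only [pvCreatedA_eq edges hwf, pvCreatedB_eq edges hwf, hstartsA]
  -- B's fold over edges filtered on u == created is a fold over pvSucc created
  have hBfold :
      edges.foldl (fun graphs e =>
          if pvU e = pvCreated edges then
            PySem.List.pySetD graphs (PySem.List.pyGetD (pvClsFinal edges) (pvV e) 0)
              (PySem.List.pyGetD graphs (PySem.List.pyGetD (pvClsFinal edges) (pvV e) 0) 0 + 1)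
          else graphs) ([0, 0, 0] : List Int)
      = (pvSucc edges (pvCreated edges)).foldl (fun graphs v =>
            PySem.List.pySetD graphs (PySem.List.pyGetD (pvClsFinal edges) v 0)
              (PySem.List.pyGetD graphs (PySem.List.pyGetD (pvClsFinal edges) v 0) 0 + 1))
          ([0, 0, 0] : List Int) := by
    rw [PySem.List.foldl_ite_eq_foldl_filter
          (p := fun e => pvU e = pvCreated edges)
          (f := fun graphs e =>
            PySem.List.pySetD graphs (PySem.List.pyGetD (pvClsFinal edges) (pvV e) 0)
              (PySem.List.pyGetD graphs (PySem.List.pyGetD (pvClsFinal edges) (pvV e) 0) 0 + 1))]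
    rw [show pvSucc edges (pvCreated edges)
          = (edges.filter (fun e => pvU e == pvCreated edges)).map pvV from rfl]
    rw [List.foldl_map]
    congr 1
  have hA :
      (pvSucc edges (pvCreated edges)).foldl (fun graphs start =>
          match walkA (pvBuildA edges).1 start ((pvMax edges + 1).toNat + 2) start 0 with
          | some g => PySem.List.pySetD graphs g (PySem.List.pyGetD graphs g 0 + 1)
          | none => graphs) ([0, 0, 0] : List Int)
      = (pvSucc edges (pvCreated edges)).foldl (fun graphs v =>
            PySem.List.pySetD graphs (PySem.List.pyGetD (pvClsFinal edges) v 0)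
              (PySem.List.pyGetD graphs (PySem.List.pyGetD (pvClsFinal edges) v 0) 0 + 1))
          [0, 0, 0] := by
    refine PySem.List.foldl_congr_mem _ _ _ _ ?_
    intro graphs s hs
    rw [pv_walkA_cls edges hwf hterm s hs]
  exact congrArg _ (hA.trans hBfold.symm)
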